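-- pv_equiv track=rewrite | github.com/Ciro-Romano/Proyecto-de-Auditoria-Sindical-para-Fabricas-de-Pinturas | scripts/import_remuneraciones_200hs.py | periodos_por_posicion
-- ===== SOURCE A (Python) =====
-- START_ANIO = 2015
--
-- START_MES = 1  # enero
--
-- def periodos_por_posicion(n):
--     anio, mes = START_ANIO, START_MES
--     resultado = []
--     for _ in range(n):
--         resultado.append((anio, mes))
--         mes += 1
--         if mes > 12:
--             mes = 1
--             anio += 1
--     return resultado
-- ===== SOURCE B (Python) =====
-- START_ANIO = 2015
--
-- START_MES = 1  # enero
--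
-- def periodos_por_posicion(n):
--     return [(START_ANIO + (START_MES - 1 + i) // 12, (START_MES - 1 + i) % 12 + 1)
--             for i in range(n)]
-- ===== Notes on version B (the rewrite author's own statement) =====
-- stated objective: idiomatic
-- what changed: Replaced the stateful (anio, mes) accumulator loop with its month-rollover branch by a stateless list comprehension computing each period in closed form via divmod on the period index.
import Mathlib
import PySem

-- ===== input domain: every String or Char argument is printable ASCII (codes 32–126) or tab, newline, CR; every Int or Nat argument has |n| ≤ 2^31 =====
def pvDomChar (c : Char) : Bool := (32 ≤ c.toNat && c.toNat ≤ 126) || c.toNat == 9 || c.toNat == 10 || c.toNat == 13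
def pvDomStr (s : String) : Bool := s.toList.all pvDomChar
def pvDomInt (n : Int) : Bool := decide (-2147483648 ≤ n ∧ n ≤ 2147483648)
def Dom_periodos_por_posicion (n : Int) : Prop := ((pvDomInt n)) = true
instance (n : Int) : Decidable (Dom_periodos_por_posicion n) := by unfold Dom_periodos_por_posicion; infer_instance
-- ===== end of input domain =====

-- B replaces the stateful (anio, mes) rollover loop with a closed-form comprehension (idiomatic; same cost).


-- ===== PORT A =====
-- literal transliteration: state (anio, mes, resultado) threaded through 'for _ in range(n)'
def periodos_por_posicion (n : Int) : List (Int × Int) :=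
  let s := (PySem.List.pyRange 0 n 1).foldl
    (fun (st : Int × Int × List (Int × Int)) (_ : Int) =>
      let anio := st.1
      let mes := st.2.1
      let resultado := st.2.2 ++ [(anio, mes)]
      let mes := mes + 1
      if mes > 12 then (anio + 1, 1, resultado) else (anio, mes, resultado))
    (2015, 1, [])
  s.2.2

-- ===== PORT B =====
-- literal transliteration of Source B: comprehension over range(n), closed form via // and %
def periodos_por_posicion_alt (n : Int) : List (Int × Int) :=
  (PySem.List.pyRange 0 n 1).map
    (fun i => (2015 + PySem.Int.floordiv (1 - 1 + i) 12, PySem.Int.mod (1 - 1 + i) 12 + 1))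

-- ===== PRECONDITION & SPEC =====
def Spec_periodos_por_posicion (n : Int) (out : List (Int × Int)) : Prop := out = periodos_por_posicion_alt n
instance (n : Int) (out : List (Int × Int)) : Decidable (Spec_periodos_por_posicion n out) := by unfold Spec_periodos_por_posicion; infer_instance

-- ===== CLAIM (what is proved, stated in full; the proofs are below) =====
def Claim_equal_periodos_por_posicion : Prop := ∀ (n : Int), Dom_periodos_por_posicion n → Spec_periodos_por_posicion n (periodos_por_posicion n)

-- ===== LEMMAS AND PROOFS =====

-- the fold's state after m iterations, in closed form
theorem pv_fold_closed (m : Nat) :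
    (PySem.List.pyRange 0 m 1).foldl
      (fun (st : Int × Int × List (Int × Int)) (_ : Int) =>
        let anio := st.1
        let mes := st.2.1
        let resultado := st.2.2 ++ [(anio, mes)]
        let mes := mes + 1
        if mes > 12 then (anio + 1, 1, resultado) else (anio, mes, resultado))
      (2015, 1, []) =
    (2015 + (m : Int) / 12, (m : Int) % 12 + 1, periodos_por_posicion_alt m) := by
  induction m with
  | zero => simp [periodos_por_posicion_alt]
  | succ k ih =>
    have hsplit : PySem.List.pyRange 0 ((k : Int) + 1) 1 =
        PySem.List.pyRange 0 (k : Int) 1 ++ [(k : Int)] :=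
      PySem.List.pyRange_one_succ_right (by positivity)
    have hk : ((k + 1 : Nat) : Int) = (k : Int) + 1 := by push_cast; ring
    rw [hk, hsplit, List.foldl_append, ih]
    simp only [List.foldl_cons, List.foldl_nil]
    unfold periodos_por_posicion_alt
    rw [hsplit, List.map_append]
    simp only [List.map_cons, List.map_nil, PySem.Int.floordiv, PySem.Int.mod]
    split_ifs with h
    · refine Prod.ext ?_ (Prod.ext ?_ ?_) <;> simp_all [Int.fdiv_eq_ediv, Int.fmod_eq_emod] <;> omega
    · refine Prod.ext ?_ (Prod.ext ?_ ?_) <;> simp_all [Int.fdiv_eq_ediv, Int.fmod_eq_emod] <;> omega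

theorem pv_equal (n : Int) : periodos_por_posicion n = periodos_por_posicion_alt n := by
  by_cases h : n ≤ 0
  · unfold periodos_por_posicion periodos_por_posicion_alt
    rw [PySem.List.pyRange_one_eq_nil h]
    rfl
  · obtain ⟨m, rfl⟩ : ∃ m : Nat, n = (m : Int) :=
      ⟨n.toNat, (Int.toNat_of_nonneg (by omega)).symm⟩
    unfold periodos_por_posicion
    rw [pv_fold_closed]

-- ===== VERDICT (by name: the statement is the Claim_ definition above) =====
theorem periodos_por_posicion_spec : Claim_equal_periodos_por_posicion := by
  intro n _
  exact pv_equal n
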